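-- pv_equiv track=rewrite | github.com/vincentiusmartin/chip2probe | chip2probe/modeler/old/training/seqextractor.py | extract_positional
-- ===== SOURCE A (Python) =====
-- import itertools
--
-- def extract_positional(seq, maxk = 2, label="seq", orientation="right"):
--     '''
--     orientation: if right, then start from 0 to the right, else start from
--     len(seq)-1 to the left
--     '''
--     if orientation == "right":
--         iterseq = str(seq)
--     else:
--         iterseq = str(seq[::-1])
--     nucleotides = ['A','C','G','T']
--     features = {}
--     for k in range(1,maxk+1):
--         perm = ["".join(p) for p in itertools.product(nucleotides, repeat=k)]
--         for i in range(0,len(iterseq)+1-k):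
--             m = 1 if orientation == "right" else -1
--             for kmer in perm:
--                 if orientation == "right":
--                     seqcmp = iterseq[i:i+k]
--                     idx = m * i + k - 1
--                 else:
--                     seqcmp = iterseq[i:i+k][::-1]
--                     idx = m * i - k + 1
--
--                 if seqcmp == kmer:
--                     features["pos_%s_%d_%s" % (label,idx,kmer)] = 1
--                 else:
--                     features["pos_%s_%d_%s" % (label,idx,kmer)] = 0
--     return features
-- ===== SOURCE B (Python) =====
-- def _block(k, win):
--     # All ACGT k-mers of length k in lexicographic (A<C<G<T) order, paired with an
--     # indicator that the k-mer equals the window; win=None means "matches nothing".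
--     if k == 0:
--         return [("", 1 if win == "" else 0)]
--     out = []
--     for c in "ACGT":
--         sub = _block(k - 1, win[1:] if win is not None and win[:1] == c else None)
--         out += [(c + km, v) for km, v in sub]
--     return out
--
-- def extract_positional(seq, maxk=2, label="seq", orientation="right"):
--     right = orientation == "right"
--     s = str(seq) if right else str(seq[::-1])
--     pairs = []
--     for k in range(1, maxk + 1):
--         for i in range(len(s) + 1 - k):
--             win = s[i:i+k] if right else s[i:i+k][::-1]
--             idx = i + k - 1 if right else -i - k + 1
--             pairs += [("pos_%s_%d_%s" % (label, idx, km), v) for km, v in _block(k, win)]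
--     return dict(pairs)
-- ===== Notes on version B (the rewrite author's own statement) =====
-- stated objective: alternative
-- what changed: B drops itertools.product and the per-kmer string comparisons: a recursive trie generator _block(k, win) builds each position's 4^k indicator block (threading the window tail down the matching branch, so the 1 lands on the path that spells the window), and the function stages a flat pairs list that is turned into a dict once at the end.
import Mathlib
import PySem

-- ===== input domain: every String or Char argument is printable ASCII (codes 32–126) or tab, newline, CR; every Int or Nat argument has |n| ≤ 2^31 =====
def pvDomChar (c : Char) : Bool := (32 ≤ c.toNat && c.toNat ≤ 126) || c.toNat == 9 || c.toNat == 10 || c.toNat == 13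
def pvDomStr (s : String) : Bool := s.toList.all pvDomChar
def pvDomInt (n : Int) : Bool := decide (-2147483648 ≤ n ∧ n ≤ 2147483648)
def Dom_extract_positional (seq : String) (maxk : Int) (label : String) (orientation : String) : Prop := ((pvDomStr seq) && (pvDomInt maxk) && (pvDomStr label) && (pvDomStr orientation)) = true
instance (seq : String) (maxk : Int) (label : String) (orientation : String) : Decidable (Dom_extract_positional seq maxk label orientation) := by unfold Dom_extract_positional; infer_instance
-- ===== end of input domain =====

-- B replaces A's product-enumeration + per-kmer string comparison by a recursive trie
-- generator of each position's indicator block (the window tail is threaded down the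
-- matching branch) and stages a flat pairs list turned into a dict once at the end
-- (alternative algorithm, same cost class).

-- ===== PORT A =====

-- ['A','C','G','T'] (as characters; Python compares length-1 strings, identical to chars)
def pvNucs : List Char := ['A', 'C', 'G', 'T']

-- itertools.product over the nucleotides with repeat=k, each tuple joined by "".join,
-- represented as a List Char (CPython order: first component varies slowest); exact for repeat = k ≥ 0
def pvProd : Nat → List (List Char)
  | 0 => [[]]
  | k + 1 => pvNucs.flatMap (fun c => (pvProd k).map (fun t => c :: t))

-- "pos_%s_%d_%s" % (label, idx, kmer), on the List Char side (PySem.Int.toChars = str(idx))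
def pvKey (label : List Char) (idx : Int) (kmer : List Char) : List Char :=
  ['p', 'o', 's', '_'] ++ label ++ ['_'] ++ PySem.Int.toChars idx ++ ['_'] ++ kmer

-- literal port of A; strings are handled on the List Char side (PySem convention),
-- seq[::-1] = reverse (PySem.List.slice?_none_none_neg_one); the String keys are rebuilt at the end
def extract_positional (seq : String) (maxk : Int) (label : String) (orientation : String) : List (String × Int) :=
  let iterseq : List Char := if orientation == "right" then seq.toList else seq.toList.reverse
  let d : PySem.Dict (List Char) Int :=
    (PySem.List.pyRange 1 (maxk + 1) 1).foldl (fun d k =>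
      let perm := pvProd k.toNat
      (PySem.List.pyRange 0 ((iterseq.length : Int) + 1 - k) 1).foldl (fun d i =>
        let m : Int := if orientation == "right" then 1 else -1
        perm.foldl (fun d kmer =>
          let seqcmp : List Char :=
            if orientation == "right" then PySem.List.slice iterseq (some i) (some (i + k))
            else (PySem.List.slice iterseq (some i) (some (i + k))).reverse
          let idx : Int := if orientation == "right" then m * i + k - 1 else m * i - k + 1
          if seqcmp == kmer then d.insert (pvKey label.toList idx kmer) 1
          else d.insert (pvKey label.toList idx kmer) 0) d) d)
      PySem.Dict.empty
  d.items.map (fun p => (String.ofList p.1, p.2))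

-- ===== PORT B =====

-- literal port of Source B's _block: recursive trie generation of all length-k kmers with
-- their indicator; 'win[1:] if win is not None and win[:1] == c else None' is the
-- head-match on the Option (List Char) window ('for c in "ACGT"' = foldl with out += …)
def pvBlock : Nat → Option (List Char) → List (List Char × Int)
  | 0, win => [([], if win == some [] then (1 : Int) else 0)]
  | k + 1, win =>
    pvNucs.foldl (fun out c =>
      out ++ (pvBlock k (match win with
        | some (x :: t) => if x == c then some t else none
        | _ => none)).map (fun p => (c :: p.1, p.2))) []

-- literal port of B (Source B): build the flat pairs list (pairs += block with keys attached),
-- then dict(pairs) = fold of inserts, then the items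
def extract_positional_alt (seq : String) (maxk : Int) (label : String) (orientation : String) : List (String × Int) :=
  let right := orientation == "right"
  let s : List Char := if right then seq.toList else seq.toList.reverse
  let pairs : List (List Char × Int) :=
    (PySem.List.pyRange 1 (maxk + 1) 1).foldl (fun acc k =>
      (PySem.List.pyRange 0 ((s.length : Int) + 1 - k) 1).foldl (fun acc i =>
        let win : List Char :=
          if right then PySem.List.slice s (some i) (some (i + k))
          else (PySem.List.slice s (some i) (some (i + k))).reverse
        let idx : Int := if right then i + k - 1 else -i - k + 1
        acc ++ (pvBlock k.toNat (some win)).map (fun p => (pvKey label.toList idx p.1, p.2))) acc) []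
  let d : PySem.Dict (List Char) Int :=
    pairs.foldl (fun d p => d.insert p.1 p.2) PySem.Dict.empty
  d.items.map (fun p => (String.ofList p.1, p.2))

-- ===== PRECONDITION & SPEC =====
def Spec_extract_positional (seq : String) (maxk : Int) (label : String) (orientation : String) (out : List (String × Int)) : Prop := out = extract_positional_alt seq maxk label orientation
instance (seq : String) (maxk : Int) (label : String) (orientation : String) (out : List (String × Int)) : Decidable (Spec_extract_positional seq maxk label orientation out) := by unfold Spec_extract_positional; infer_instance

-- ===== CLAIM (what is proved, stated in full; the proofs are below) =====
def Claim_equal_extract_positional : Prop := ∀ (seq : String) (maxk : Int) (label : String) (orientation : String), Dom_extract_positional seq maxk label orientation → Spec_extract_positional seq maxk label orientation (extract_positional seq maxk label orientation)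

-- ===== LEMMAS AND PROOFS =====

-- the trie block is exactly the product list paired with the match indicator
lemma pvBlock_eq (k : Nat) : ∀ (w : Option (List Char)),
    pvBlock k w = (pvProd k).map (fun km => (km, if w == some km then (1 : Int) else 0)) := by
  induction k with
  | zero => intro w; simp [pvBlock, pvProd]
  | succ k ih =>
    intro w
    rw [pvBlock, PySem.List.foldl_append_eq_flatMap]
    simp only [List.nil_append, pvProd, List.map_flatMap]
    apply List.flatMap_congr
    intro c _
    rw [ih, List.map_map, List.map_map]
    apply List.map_congr_left
    intro km _
    simp only [Function.comp_apply]
    congr 1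
    match w with
    | none => rfl
    | some [] => rfl
    | some (x :: t) =>
      by_cases hx : x = c
      · subst hx; simp
      · have h1 : (x == c) = false := by simpa using hx
        simp [h1]

-- folding inserts over the flat block with keys attached = A's inner compare loop
lemma pv_pos (label : List Char) (idx : Int) (sub : List Char) (k : Nat)
    (d : PySem.Dict (List Char) Int) :
    ((pvBlock k (some sub)).map (fun p => (pvKey label idx p.1, p.2))).foldl
        (fun d p => d.insert p.1 p.2) d
      = (pvProd k).foldl (fun d kmer =>
          if sub == kmer then d.insert (pvKey label idx kmer) 1
          else d.insert (pvKey label idx kmer) 0) d := by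
  rw [pvBlock_eq, List.map_map, List.foldl_map]
  apply PySem.List.foldl_congr_mem
  intro d km _
  by_cases h : sub == km
  · simp [Function.comp, h]
  · have h' : (sub == km) = false := by simpa using h
    simp [Function.comp, h']

-- folding inserts over a fold-of-appends = the corresponding fold of dict steps
lemma pv_hoist {α : Type} (g : α → List (List Char × Int))
    (step : PySem.Dict (List Char) Int → α → PySem.Dict (List Char) Int) :
    ∀ (l : List α),
      (∀ (d : PySem.Dict (List Char) Int) (x : α), x ∈ l →
        (g x).foldl (fun d p => d.insert p.1 p.2) d = step d x) →
      ∀ (acc : List (List Char × Int)) (d0 : PySem.Dict (List Char) Int),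
      (l.foldl (fun a x => a ++ g x) acc).foldl (fun d p => d.insert p.1 p.2) d0
        = l.foldl step (acc.foldl (fun d p => d.insert p.1 p.2) d0) := by
  intro l
  induction l with
  | nil => intro _ acc d0; rfl
  | cons x xs ih =>
    intro h acc d0
    simp only [List.foldl_cons]
    rw [ih (fun d y hy => h d y (List.mem_cons_of_mem _ hy)) (acc ++ g x) d0,
        List.foldl_append, h _ x (List.mem_cons_self)]

-- both ports, with the orientation fixed: fold-of-appends then dict(pairs) = A's nested dict folds
lemma pv_main (inner : Int → List Int) (sub : Int → Int → List Char)
    (idx : Int → Int → Int) (label : List Char) :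
    ∀ (outer : List Int) (acc : List (List Char × Int)) (d0 : PySem.Dict (List Char) Int),
    (outer.foldl (fun a k => (inner k).foldl (fun a i =>
        a ++ (pvBlock k.toNat (some (sub k i))).map (fun p => (pvKey label (idx k i) p.1, p.2))) a) acc).foldl
      (fun d p => d.insert p.1 p.2) d0
    = outer.foldl (fun d k => (inner k).foldl (fun d i =>
        (pvProd k.toNat).foldl (fun d kmer =>
          if sub k i == kmer then d.insert (pvKey label (idx k i) kmer) 1
          else d.insert (pvKey label (idx k i) kmer) 0) d) d)
        (acc.foldl (fun d p => d.insert p.1 p.2) d0) := by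
  intro outer
  induction outer with
  | nil => intro acc d0; rfl
  | cons k ks ih =>
    intro acc d0
    simp only [List.foldl_cons]
    rw [ih, pv_hoist (fun i => (pvBlock k.toNat (some (sub k i))).map
          (fun p => (pvKey label (idx k i) p.1, p.2)))
        (fun d i => (pvProd k.toNat).foldl (fun d kmer =>
          if sub k i == kmer then d.insert (pvKey label (idx k i) kmer) 1
          else d.insert (pvKey label (idx k i) kmer) 0) d)
        (inner k) (fun d i _ => pv_pos label (idx k i) (sub k i) k.toNat d) acc d0]

theorem extract_positional_spec : Claim_equal_extract_positional := by
  intro seq maxk label orientation _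
  unfold Spec_extract_positional extract_positional extract_positional_alt
  refine congrArg (List.map _) (congrArg PySem.Dict.items ?_)
  by_cases hor : (orientation == "right") = true
  · simp only [hor, if_true, one_mul]
    exact (pv_main _ _ (fun k i => i + k - 1) label.toList _ [] PySem.Dict.empty).symm
  · have hor' : (orientation == "right") = false := by simpa using hor
    simp only [hor', Bool.false_eq_true, if_false, neg_one_mul]
    exact (pv_main _ _ (fun k i => -i - k + 1) label.toList _ [] PySem.Dict.empty).symm
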